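-- pv_equiv track=rewrite | github.com/aiguofer/gspread-pandas | gspread_pandas/util.py | folders_to_create
-- ===== SOURCE A (Python) =====
-- def folders_to_create(search_path, dirs, base_path=""):
--     """
--     Recursively traverse through folder paths looking for the longest existing subpath.
--
--     Return the dir info of the longest subpath and the directories that
--     need to be created.
--     """
--     # Allow user to pass in a string, but use a list in the recursion
--     if isinstance(search_path, list):
--         parts = search_path
--     else:
--         parts = search_path.strip("/").split("/")
--
--     parent = [dr for dr in dirs if dr.get("path", "") == base_path]
--     if len(parent) == 0:
--         parent = {"id": "root"}
--     else:
--         parent = parent.pop()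
--
--     # Stop if we ran out of parts to create
--     if len(parts) == 0:
--         return parent, []
--
--     base_path += "/" + parts[0]
--
--     dirs = [dr for dr in dirs if dr.get("path", "").startswith(base_path)]
--
--     # If there's base_path matches, then keep looking for a longer path
--     if len(dirs) > 0:
--         return folders_to_create(parts[1:], dirs, base_path)
--     else:
--         return parent, parts
-- ===== SOURCE B (Python) =====
-- def folders_to_create(search_path, dirs, base_path=""):
--     """
--     Find the dir info of the longest existing subpath and the directories
--     that need to be created.
--
--     Instead of re-filtering the dir list at every recursion level, compute
--     each dir's path once, walk the parts extending a single prefix as long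
--     as some path still starts with it, then pick the parent in one final scan.
--     """
--     if isinstance(search_path, list):
--         parts = search_path
--     else:
--         parts = search_path.strip("/").split("/")
--
--     paths = [dr.get("path", "") for dr in dirs]
--
--     prefix = base_path
--     k = 0
--     while k < len(parts):
--         nxt = prefix + "/" + parts[k]
--         if any(p.startswith(nxt) for p in paths):
--             prefix = nxt
--             k += 1
--         else:
--             break
--
--     parent = {"id": "root"}
--     for dr, p in zip(dirs, paths):
--         if p == prefix:
--             parent = dr
--     return parent, parts[k:]
-- ===== Notes on version B (the rewrite author's own statement) =====
-- stated objective: alternative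
-- what changed: Replaces A's recursion that rebuilds a filtered dir list (and re-reads every dict's 'path') at each level with a single pass that extracts each dir's path once, one iterative prefix walk over the parts, and one final scan picking the last dir whose path equals the longest existing prefix.
import Mathlib
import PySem

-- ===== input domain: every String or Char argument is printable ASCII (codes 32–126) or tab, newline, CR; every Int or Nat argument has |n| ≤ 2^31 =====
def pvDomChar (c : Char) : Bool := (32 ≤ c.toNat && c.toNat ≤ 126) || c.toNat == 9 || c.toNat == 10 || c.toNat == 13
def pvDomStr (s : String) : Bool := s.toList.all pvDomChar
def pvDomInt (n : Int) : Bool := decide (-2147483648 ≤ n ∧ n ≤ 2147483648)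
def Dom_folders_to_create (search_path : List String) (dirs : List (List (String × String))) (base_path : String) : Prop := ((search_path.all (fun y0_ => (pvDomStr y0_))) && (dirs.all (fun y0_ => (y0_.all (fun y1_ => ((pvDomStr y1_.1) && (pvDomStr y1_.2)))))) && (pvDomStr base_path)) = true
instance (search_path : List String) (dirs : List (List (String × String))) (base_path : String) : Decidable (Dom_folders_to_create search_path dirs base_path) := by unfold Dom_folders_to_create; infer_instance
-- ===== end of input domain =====

-- B re-implements A without rebuilding filtered dir lists at every recursion level: it computes
-- each dir's path once, walks the parts extending one prefix, and picks the parent in one final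
-- scan (objective: alternative decomposition; same exact return value).

-- ===== PORT A =====
-- dr.get("path", "") on the association-list dict
def pvPathA (dr : List (String × String)) : String := PySem.Dict.getD ⟨dr⟩ "path" ""

def folders_to_create (search_path : List String) (dirs : List (List (String × String))) (base_path : String) : (List (String × String)) × List String :=
  -- parent = [dr for dr in dirs if dr.get("path","") == base_path]; {"id":"root"} if empty else .pop()
  let parentL := dirs.filter (fun dr => pvPathA dr == base_path)
  let parent := match parentL.getLast? with
    | none => [("id", "root")]
    | some dr => dr
  match search_path with
  | [] => (parent, [])
  | p :: rest =>
    let base_path' := base_path ++ "/" ++ p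
    let dirs' := dirs.filter (fun dr => PySem.Str.startswith (pvPathA dr) base_path')
    if dirs'.length > 0 then folders_to_create rest dirs' base_path'
    else (parent, p :: rest)

-- ===== PORT B =====
-- the while loop of Source B: extend the prefix while some path starts with it
def pvWalkB (paths : List String) (parts : List String) (pfx : String) : String × List String :=
  match parts with
  | [] => (pfx, [])
  | p :: rest =>
    let nxt := pfx ++ "/" ++ p
    if paths.any (fun q => PySem.Str.startswith q nxt) then pvWalkB paths rest nxt
    else (pfx, p :: rest)

def folders_to_create_alt (search_path : List String) (dirs : List (List (String × String))) (base_path : String) : (List (String × String)) × List String :=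
  let paths := dirs.map (fun dr => PySem.Dict.getD ⟨dr⟩ "path" "")
  let pr := pvWalkB paths search_path base_path
  -- parent = {"id":"root"}; for dr, p in zip(dirs, paths): if p == prefix: parent = dr
  let parent := (dirs.zip paths).foldl
    (fun acc (drp : List (String × String) × String) => if drp.2 == pr.1 then drp.1 else acc) [("id", "root")]
  (parent, pr.2)

-- ===== PRECONDITION & SPEC =====
def Spec_folders_to_create (search_path : List String) (dirs : List (List (String × String))) (base_path : String) (out : (List (String × String)) × List String) : Prop := out = folders_to_create_alt search_path dirs base_path
instance (search_path : List String) (dirs : List (List (String × String))) (base_path : String) (out : (List (String × String)) × List String) : Decidable (Spec_folders_to_create search_path dirs base_path out) := by unfold Spec_folders_to_create; infer_instance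

-- ===== CLAIM (what is proved, stated in full; the proofs are below) =====
def Claim_equal_folders_to_create : Prop := ∀ (search_path : List String) (dirs : List (List (String × String))) (base_path : String), Dom_folders_to_create search_path dirs base_path → Spec_folders_to_create search_path dirs base_path (folders_to_create search_path dirs base_path)

-- ===== LEMMAS AND PROOFS =====

-- A's parent (last dir whose path equals pre, default root) as a function
def pvParent (dirs : List (List (String × String))) (pre : String) : List (String × String) :=
  match (dirs.filter (fun dr => pvPathA dr == pre)).getLast? with
  | none => [("id", "root")]
  | some dr => dr

-- B's zip/foldl parent scan computes A's last-match parent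
theorem parentB_eq (dirs : List (List (String × String))) (pre : String) :
    (dirs.zip (dirs.map (fun dr => PySem.Dict.getD ⟨dr⟩ "path" ""))).foldl
      (fun acc (drp : List (String × String) × String) => if drp.2 == pre then drp.1 else acc) [("id", "root")]
    = pvParent dirs pre := by
  induction dirs using List.reverseRecOn with
  | nil => simp [pvParent]
  | append_singleton ds d ih =>
    rw [List.map_append, List.zip_append (by simp), List.foldl_append, ih]
    simp only [List.map_cons, List.map_nil, List.zip_cons_cons, List.zip_nil_right,
      List.foldl_cons, List.foldl_nil, pvParent, List.filter_append]
    by_cases h : pvPathA d == pre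
    · have h' : pvPathA d = pre := by simpa using h
      simp [pvPathA] at h' ⊢
      simp [h']
    · simp only [List.filter_cons, List.filter_nil, pvPathA] at *
      rw [if_neg (by simpa [pvPathA] using h)]
      simp [h]

-- startswith is antitone in the prefix argument
theorem startswith_of_prefix {q p1 p2 : String} (h : p1.toList <+: p2.toList)
    (hq : PySem.Str.startswith q p2 = true) : PySem.Str.startswith q p1 = true := by
  rw [PySem.Str.startswith_eq, PySem.Chars.startswith_iff] at *
  exact h.trans hq

-- the walk only extends its prefix
theorem pvWalkB_prefix (paths parts : List String) (pfx : String) :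
    pfx.toList <+: (pvWalkB paths parts pfx).1.toList := by
  induction parts generalizing pfx with
  | nil => simp [pvWalkB]
  | cons p rest ih =>
    simp only [pvWalkB]
    split
    · exact List.IsPrefix.trans (by simp) (ih _)
    · simp

-- walking a path list filtered by a shorter prefix is the same walk
theorem pvWalkB_filter (parts : List String) (paths : List String) (pre0 pfx : String)
    (h : pre0.toList <+: pfx.toList) :
    pvWalkB (paths.filter (fun q => PySem.Str.startswith q pre0)) parts pfx
      = pvWalkB paths parts pfx := by
  induction parts generalizing pfx with
  | nil => simp [pvWalkB]
  | cons p rest ih =>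
    have hnxt : pre0.toList <+: (pfx ++ "/" ++ p).toList :=
      List.IsPrefix.trans h (by simp)
    have hany : (paths.filter (fun q => PySem.Str.startswith q pre0)).any
        (fun q => PySem.Str.startswith q (pfx ++ "/" ++ p))
        = paths.any (fun q => PySem.Str.startswith q (pfx ++ "/" ++ p)) := by
      rw [List.any_filter]
      congr 1
      funext q
      cases hq : PySem.Str.startswith q (pfx ++ "/" ++ p) with
      | false => rw [Bool.and_false]
      | true => rw [Bool.and_true, startswith_of_prefix hnxt hq]
    simp only [pvWalkB, hany]
    split
    · exact ih _ hnxt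
    · rfl

-- the parent scan ignores a filter by a prefix of the scanned path
theorem pvParent_filter (dirs : List (List (String × String))) (pre0 pre : String)
    (h : pre0.toList <+: pre.toList) :
    pvParent (dirs.filter (fun dr => PySem.Str.startswith (pvPathA dr) pre0)) pre
      = pvParent dirs pre := by
  unfold pvParent
  rw [List.filter_filter]
  have hf : List.filter (fun a => pvPathA a == pre && PySem.Str.startswith (pvPathA a) pre0) dirs
      = List.filter (fun dr => pvPathA dr == pre) dirs := by
    apply List.filter_congr
    intro dr _
    cases he : (pvPathA dr == pre) with
    | false => rw [Bool.false_and]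
    | true =>
      have heq : pvPathA dr = pre := by simpa using he
      have hsw : PySem.Str.startswith (pvPathA dr) pre0 = true := by
        rw [heq, PySem.Str.startswith_eq, PySem.Chars.startswith_iff]; exact h
      rw [hsw, Bool.true_and]
  rw [hf]

-- B's result in closed form
theorem alt_eq (sp : List String) (dirs : List (List (String × String))) (bp : String) :
    folders_to_create_alt sp dirs bp
      = (pvParent dirs (pvWalkB (dirs.map (fun dr => PySem.Dict.getD ⟨dr⟩ "path" "")) sp bp).1,
         (pvWalkB (dirs.map (fun dr => PySem.Dict.getD ⟨dr⟩ "path" "")) sp bp).2) := by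
  simp only [folders_to_create_alt, parentB_eq]

theorem main_eq (parts : List String) (dirs : List (List (String × String))) (bp : String) :
    folders_to_create parts dirs bp = folders_to_create_alt parts dirs bp := by
  induction parts generalizing dirs bp with
  | nil =>
    rw [alt_eq]
    simp only [folders_to_create, pvWalkB, pvParent]
  | cons p rest ih =>
    by_cases hc : dirs.filter (fun dr => PySem.Str.startswith (pvPathA dr) (bp ++ "/" ++ p)) = []
    · have hany : (dirs.map (fun dr => PySem.Dict.getD ⟨dr⟩ "path" "")).any
          (fun q => PySem.Str.startswith q (bp ++ "/" ++ p)) = false := by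
        rw [List.any_map]
        rw [List.filter_eq_nil_iff] at hc
        simp only [List.any_eq_false]
        intro dr hdr
        exact fun hq => (hc dr hdr) (by simpa [pvPathA] using hq)
      rw [alt_eq]
      simp only [folders_to_create, pvWalkB, hany, hc]
      simp [pvParent]
    · have hany : (dirs.map (fun dr => PySem.Dict.getD ⟨dr⟩ "path" "")).any
          (fun q => PySem.Str.startswith q (bp ++ "/" ++ p)) = true := by
        obtain ⟨dr, hdrf⟩ := List.exists_mem_of_ne_nil _ hc
        obtain ⟨hmem, hp⟩ := List.mem_filter.1 hdrf
        rw [List.any_map]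
        exact List.any_eq_true.2 ⟨dr, hmem, by simpa [Function.comp, pvPathA] using hp⟩
      have hlen : (dirs.filter (fun dr => PySem.Str.startswith (pvPathA dr) (bp ++ "/" ++ p))).length > 0 :=
        List.length_pos_of_ne_nil hc
      have hmap : (dirs.filter (fun dr => PySem.Str.startswith (pvPathA dr) (bp ++ "/" ++ p))).map
            (fun dr => PySem.Dict.getD ⟨dr⟩ "path" "")
          = (dirs.map (fun dr => PySem.Dict.getD ⟨dr⟩ "path" "")).filter
            (fun q => PySem.Str.startswith q (bp ++ "/" ++ p)) := by
        rw [show (fun dr => PySem.Str.startswith (pvPathA dr) (bp ++ "/" ++ p))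
              = ((fun q => PySem.Str.startswith q (bp ++ "/" ++ p))
                  ∘ (fun dr => PySem.Dict.getD ⟨dr⟩ "path" "")) from rfl]
        exact List.filter_map.symm
      have hwalk : pvWalkB ((dirs.filter (fun dr => PySem.Str.startswith (pvPathA dr) (bp ++ "/" ++ p))).map
            (fun dr => PySem.Dict.getD ⟨dr⟩ "path" "")) rest (bp ++ "/" ++ p)
          = pvWalkB (dirs.map (fun dr => PySem.Dict.getD ⟨dr⟩ "path" "")) rest (bp ++ "/" ++ p) := by
        rw [hmap]
        exact pvWalkB_filter rest _ _ _ (List.prefix_refl _)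
      have hA : folders_to_create (p :: rest) dirs bp
          = folders_to_create rest (dirs.filter (fun dr => PySem.Str.startswith (pvPathA dr) (bp ++ "/" ++ p))) (bp ++ "/" ++ p) := by
        simp only [folders_to_create]
        rw [if_pos hlen]
      rw [hA, ih, alt_eq, alt_eq, hwalk]
      have hpre := pvWalkB_prefix (dirs.map (fun dr => PySem.Dict.getD ⟨dr⟩ "path" "")) rest (bp ++ "/" ++ p)
      simp only [pvWalkB, hany, if_true]
      rw [pvParent_filter _ _ _ hpre]

-- ===== VERDICT (by name: the statement is the Claim_ definition above) =====
theorem folders_to_create_spec : Claim_equal_folders_to_create := by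
  intro sp dirs bp _
  exact main_eq sp dirs bp
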